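-- pv_equiv track=rewrite | github.com/YarosLove91/ALU_discrete_ic | theory/virtual_fpga_boards-stand_ALU_16b/virtual_fpga_boards-stand_ALU_16b/app.py | process_display_value
-- ===== SOURCE A (Python) =====
-- def process_display_value(value):
--     """Преобразует 8-битное значение в состояния сегментов индикатора"""
--     if value == -1:
--         return [0] * 8
--     value = value & 0xFF
--     binary_str = format(value, '08b')
--     reversed_str = binary_str[::-1]
--     inverted_str = ''.join(['1' if bit == '0' else '0' for bit in reversed_str])
--     segments_state = [int(bit) for bit in inverted_str]
--     return segments_state
-- ===== SOURCE B (Python) =====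
-- def process_display_value(value):
--     """Преобразует 8-битное значение в состояния сегментов индикатора"""
--     inv = (value & 0xFF) ^ 0xFF
--     return [(inv >> i) & 1 for i in range(8)]
-- ===== Notes on version B (the rewrite author's own statement) =====
-- stated objective: simpler
-- what changed: Replaces the format/reverse/per-character string inversion with pure bit arithmetic: invert the masked byte once with XOR 0xFF and read the 8 bits out LSB-first; the explicit value == -1 guard is dropped because the general path already yields [0]*8 there.
import Mathlib
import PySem

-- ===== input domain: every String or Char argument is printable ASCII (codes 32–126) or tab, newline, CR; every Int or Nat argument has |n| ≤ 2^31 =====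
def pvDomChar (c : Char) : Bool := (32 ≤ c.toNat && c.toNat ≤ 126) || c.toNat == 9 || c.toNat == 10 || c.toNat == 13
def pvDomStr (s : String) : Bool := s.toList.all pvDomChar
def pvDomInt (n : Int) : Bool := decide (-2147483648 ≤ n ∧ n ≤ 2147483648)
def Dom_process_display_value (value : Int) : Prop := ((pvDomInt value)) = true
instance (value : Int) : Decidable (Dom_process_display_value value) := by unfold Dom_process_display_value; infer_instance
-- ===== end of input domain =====

-- B replaces A's string formatting/reversal/per-character inversion with direct bit
-- arithmetic (mask, XOR-invert, extract bits LSB-first); simpler, same result.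


-- ===== PORT A =====
-- exact port of format(v, '08b') for 0 ≤ v < 256 (the argument A passes): the 8 binary
-- digits of v, most significant first
def pvFormat08b (v : Int) : List Char :=
  (List.range 8).map (fun i => if PySem.Int.band (v >>> (7 - i)) 1 = 1 then '1' else '0')

def process_display_value (value : Int) : List Int :=
  if value = -1 then List.replicate 8 0
  else
    let v := PySem.Int.band value 255
    let binary_str := pvFormat08b v
    let reversed_str := binary_str.reverse                                -- binary_str[::-1]
    let inverted_str := reversed_str.map (fun bit => if bit = '0' then '1' else '0')
    inverted_str.map (fun bit => if bit = '1' then (1 : Int) else 0)      -- int(bit): bits are '0'/'1'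

-- ===== PORT B =====
def process_display_value_alt (value : Int) : List Int :=
  let inv := PySem.Int.bxor (PySem.Int.band value 255) 255
  (List.range 8).map (fun i => PySem.Int.band (inv >>> i) 1)

-- ===== PRECONDITION & SPEC =====
def Spec_process_display_value (value : Int) (out : List Int) : Prop := out = process_display_value_alt value
instance (value : Int) (out : List Int) : Decidable (Spec_process_display_value value out) := by unfold Spec_process_display_value; infer_instance

-- ===== CLAIM (what is proved, stated in full; the proofs are below) =====
def Claim_equal_process_display_value : Prop := ∀ (value : Int), Dom_process_display_value value → Spec_process_display_value value (process_display_value value)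

-- ===== LEMMAS AND PROOFS =====
theorem pv_nat_and255 (n : Nat) : n &&& 255 = n % 256 := by
  have := Nat.and_two_pow_sub_one_eq_mod n 8
  norm_num at this; omega

theorem pv_band255 (v : Int) : PySem.Int.band v 255 = v % 256 := by
  unfold PySem.Int.band
  have h1 : Int.toNat 255 = 255 := rfl
  split_ifs with h h3 h4
  · rw [h1, pv_nat_and255]; omega
  · omega
  · rw [h1, Nat.land_comm, pv_nat_and255]; omega
  · omega

-- both programs depend on value only through value % 256 (off the -1 branch)
theorem pv_A_mod (v : Int) (h : v ≠ -1) :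
    process_display_value v = process_display_value (v % 256) := by
  have he : v % 256 % 256 = v % 256 := Int.emod_emod_of_dvd v dvd_rfl
  have h0 : 0 ≤ v % 256 := Int.emod_nonneg v (by norm_num)
  unfold process_display_value
  rw [if_neg h, if_neg (by omega), pv_band255, pv_band255, he]

theorem pv_B_mod (v : Int) :
    process_display_value_alt v = process_display_value_alt (v % 256) := by
  have he : v % 256 % 256 = v % 256 := Int.emod_emod_of_dvd v dvd_rfl
  unfold process_display_value_alt
  rw [pv_band255, pv_band255, he]

set_option maxRecDepth 4096 in
theorem pv_key : ∀ k : Fin 256,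
    process_display_value (k : Int) = process_display_value_alt (k : Int) := by decide

-- ===== VERDICT (by name: the statement is the Claim_ definition above) =====
theorem process_display_value_spec : Claim_equal_process_display_value := by
  intro value _
  unfold Spec_process_display_value
  by_cases h : value = -1
  · subst h; decide
  · rw [pv_A_mod value h, pv_B_mod value]
    have h0 : 0 ≤ value % 256 := Int.emod_nonneg value (by norm_num)
    have h1 : value % 256 < 256 := Int.emod_lt_of_pos value (by norm_num)
    have := pv_key ⟨(value % 256).toNat, by omega⟩
    simpa [Int.toNat_of_nonneg h0] using this
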